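-- pv_equiv track=rewrite | github.com/orlando572/AhorraQP | backend/app/scrapers/tottus_scraper.py | _extract_category_from_url
-- ===== SOURCE A (Python) =====
-- def _extract_category_from_url(url: str) -> str:
--     """
--     Extrae la categoría de la URL
--     Ej: /tottus-pe/lista/CATG16815/Arroz -> "Arroz"
--     """
--     if not url:
--         return "General"
--
--     # Buscar el nombre después del último /
--     parts = url.split('/')
--
--     # Buscar el patrón: /CATGXXXXX/NombreCategoria
--     for i, part in enumerate(parts):
--         if part.startswith('CATG') and i + 1 < len(parts):
--             category_name = parts[i + 1]
--             # Limpiar parámetros de query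
--             if '?' in category_name:
--                 category_name = category_name.split('?')[0]
--             return category_name.replace('-', ' ').title()
--
--     return "General"
-- ===== SOURCE B (Python) =====
-- def _extract_category_from_url(url: str) -> str:
--     if not url:
--         return "General"
--     # regex-style direct substring search: find the first 'CATG' that starts a
--     # path segment (start of string or right after '/'), never splitting the URL
--     i = url.find('CATG')
--     while i != -1 and i != 0 and url[i - 1] != '/':
--         i = url.find('CATG', i + 1)
--     if i == -1:
--         return "General"
--     j = url.find('/', i)          # end of the CATG segment
--     if j == -1:
--         return "General"
--     e1 = url.find('/', j + 1)     # end of the category segment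
--     if e1 == -1:
--         e1 = len(url)
--     e2 = url.find('?', j + 1)     # query start, if any, cuts it first
--     if e2 == -1:
--         e2 = len(url)
--     return url[j + 1:min(e1, e2)].replace('-', ' ').title()
-- ===== Notes on version B (the rewrite author's own statement) =====
-- stated objective: alternative
-- what changed: B never splits the URL into segments: it regex-style searches the raw string with str.find for the first 'CATG' occurrence that sits at a segment boundary (start or after '/'), then locates the category's bounding '/' and '?' by further find calls and slices it out directly.
import Mathlib
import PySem

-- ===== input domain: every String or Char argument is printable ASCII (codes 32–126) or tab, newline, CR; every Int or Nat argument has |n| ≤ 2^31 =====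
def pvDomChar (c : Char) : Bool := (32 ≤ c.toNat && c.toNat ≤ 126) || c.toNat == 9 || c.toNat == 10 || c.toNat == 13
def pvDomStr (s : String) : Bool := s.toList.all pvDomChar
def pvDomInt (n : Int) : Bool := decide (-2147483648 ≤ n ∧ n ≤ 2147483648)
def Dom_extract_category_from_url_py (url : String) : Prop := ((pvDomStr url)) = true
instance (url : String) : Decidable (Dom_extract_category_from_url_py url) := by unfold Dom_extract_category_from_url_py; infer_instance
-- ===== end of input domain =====

-- B replaces A's split-into-segments + enumerate loop by direct substring search (str.find) for a
-- 'CATG' occurrence at a segment boundary, slicing the category out of the raw URL; objective: alternative, same cost.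

-- shared helper: Python str.title() (exact on ASCII, where the cased characters are the letters)
def pvTitleGo : Bool → List Char → List Char
  | _, [] => []
  | prevAlpha, c :: cs =>
    (if c.isAlpha then (if prevAlpha then c.toLower else c.toUpper) else c) :: pvTitleGo c.isAlpha cs

def pvTitle (l : List Char) : List Char := pvTitleGo false l

-- ===== PORT A =====
-- "if '?' in category_name: category_name = category_name.split('?')[0]; return category_name.replace('-', ' ').title()"
def pvCleanA (name : List Char) : String :=
  let name := if PySem.Chars.isIn ['?'] name then (PySem.Chars.splitOn name ['?']).headD [] else name
  String.ofList (pvTitle (PySem.Chars.replace name ['-'] [' ']))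

-- "for i, part in enumerate(parts): if part.startswith('CATG') and i + 1 < len(parts): … return …"
-- (i + 1 < len(parts) ⟺ the current part has a successor in the list)
def pvLoopA : List (List Char) → String
  | [] => "General"
  | [_] => "General"
  | part :: next :: rest =>
    if PySem.Chars.startswith part "CATG".toList then pvCleanA next
    else pvLoopA (next :: rest)

def extract_category_from_url_py (url : String) : String :=
  if url = "" then "General"
  else pvLoopA (PySem.Chars.splitOn url.toList "/".toList)

-- ===== PORT B =====
def pvCatg : List Char := ['C', 'A', 'T', 'G']

-- (termination fact for the skip loop: a found 'CATG' occurrence lies strictly inside the string)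
theorem pvOccLt {l : List Char} {m : Nat} (h : pvCatg <+: l.drop m) : m < l.length := by
  have hle := h.length_le
  simp [pvCatg] at hle
  omega

-- "while i != -1 and i != 0 and url[i-1] != '/': i = url.find('CATG', i + 1)"
-- (none plays Python's -1; the dite guard only makes the recursion total — Source B always has i+1 ≤ len(url))
def pvSkip (l : List Char) (i : Nat) : Option Nat :=
  if i = 0 ∨ l[i-1]? = some '/' then some i
  else if h : i + 1 ≤ l.length then
    if hf : PySem.Chars.findFrom l pvCatg (↑(i + 1) : Int) = -1 then none
    else pvSkip l (PySem.Chars.findFrom l pvCatg (↑(i + 1) : Int)).toNat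
  else none
termination_by l.length - i
decreasing_by
  obtain ⟨h1, h2, -⟩ := PySem.Chars.findFrom_natCast_spec l pvCatg (i + 1) h hf
  have h3 := pvOccLt h2
  omega

-- "i = url.find('CATG')" followed by the skip loop
def pvBSearch (l : List Char) : Option Nat :=
  if PySem.Chars.find l pvCatg = -1 then none
  else pvSkip l (PySem.Chars.find l pvCatg).toNat

-- "j = url.find('/', i) … e1/e2 … return url[j+1:min(e1,e2)].replace('-',' ').title()"
def pvTail (l : List Char) (i : Nat) : String :=
  let j := PySem.Chars.findFrom l ['/'] (↑i : Int)
  if j = -1 then "General"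
  else
    let e1 := PySem.Chars.findFrom l ['/'] (j + 1)
    let e1 := if e1 = -1 then (l.length : Int) else e1
    let e2 := PySem.Chars.findFrom l ['?'] (j + 1)
    let e2 := if e2 = -1 then (l.length : Int) else e2
    String.ofList (pvTitle (PySem.Chars.replace
      (PySem.List.slice l (some (j + 1)) (some (min e1 e2))) ['-'] [' ']))

def pvAltBody (l : List Char) : String :=
  match pvBSearch l with
  | none => "General"
  | some i => pvTail l i

def extract_category_from_url_py_alt (url : String) : String :=
  if url = "" then "General"
  else pvAltBody url.toList

-- ===== PRECONDITION & SPEC =====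
def Spec_extract_category_from_url_py (url : String) (out : String) : Prop := out = extract_category_from_url_py_alt url
instance (url : String) (out : String) : Decidable (Spec_extract_category_from_url_py url out) := by unfold Spec_extract_category_from_url_py; infer_instance

-- ===== CLAIM (what is proved, stated in full; the proofs are below) =====
def Claim_equal_extract_category_from_url_py : Prop := ∀ (url : String), Dom_extract_category_from_url_py url → Spec_extract_category_from_url_py url (extract_category_from_url_py url)

-- ===== LEMMAS AND PROOFS =====

-- an occurrence of 'CATG' at index j / one that starts a path segment
def pvOcc (l : List Char) (j : Nat) : Prop := pvCatg <+: l.drop j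
def pvBdy (l : List Char) (j : Nat) : Prop := pvOcc l j ∧ (j = 0 ∨ l[j - 1]? = some '/')

-- proof-side reference splitter (relates port A's splitOn to list structure)
def pvPartition (sep : Char) : List Char → List Char × Option (List Char)
  | [] => ([], none)
  | c :: cs =>
    if c = sep then ([], some cs)
    else
      let r := pvPartition sep cs
      (c :: r.1, r.2)

theorem pvPartition_some_length (sep : Char) (l r : List Char)
    (h : (pvPartition sep l).2 = some r) : r.length < l.length := by
  induction l with
  | nil => simp [pvPartition] at h
  | cons c cs ih =>
    by_cases hc : c = sep
    · simp [pvPartition, hc] at h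
      simp [← h, List.length_cons]
    · simp [pvPartition, hc] at h
      have := ih h
      simp [List.length_cons]; omega

def pvSplit (sep : Char) (l : List Char) : List (List Char) :=
  match h : pvPartition sep l with
  | (a, none) => [a]
  | (a, some r) => a :: pvSplit sep r
termination_by l.length
decreasing_by exact pvPartition_some_length sep l r (by rw [h])

theorem pvSplit_eq (sep : Char) (l : List Char) :
    pvSplit sep l = (pvPartition sep l).1 :: (pvPartition sep l).2.elim [] (pvSplit sep) := by
  rw [pvSplit]
  split <;> (rename_i h; simp [h])

theorem splitOn_go_eq (k : Char) (fuel : Nat) (l cur : List Char) (acc : List (List Char))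
    (hf : l.length < fuel) :
    PySem.Chars.splitOn.go [k] fuel l cur acc
      = acc.reverse ++ (pvSplit k l).modifyHead (cur.reverse ++ ·) := by
  induction fuel generalizing l cur acc with
  | zero => omega
  | succ fuel ih =>
    cases l with
    | nil =>
      rw [PySem.Chars.splitOn.go]
      · rw [pvSplit_eq]; simp [pvPartition]
      · exact fun h => absurd h (Nat.succ_ne_zero fuel)
    | cons c rest =>
      rw [PySem.Chars.splitOn.go]
      by_cases hc : c = k
      · subst hc
        rw [if_pos (by simp [List.isPrefixOf])]
        have hrest : (List.drop [c].length (c :: rest)) = rest := by simp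
        rw [hrest, ih rest [] (cur.reverse :: acc) (by simp at hf ⊢; omega)]
        rw [pvSplit_eq c (c :: rest)]
        simp [pvPartition]
        rw [pvSplit_eq c rest]
        simp
      · rw [if_neg (by simp [List.isPrefixOf, beq_iff_eq]; exact fun h => hc h.symm)]
        rw [ih rest (c :: cur) acc (by simp at hf ⊢; omega)]
        rw [pvSplit_eq k (c :: rest), pvSplit_eq k rest]
        simp [pvPartition, hc]

theorem splitOn_eq_pvSplit (k : Char) (l : List Char) :
    PySem.Chars.splitOn l [k] = pvSplit k l := by
  rw [PySem.Chars.splitOn, splitOn_go_eq k (l.length + 1) l [] [] (by omega)]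
  rw [pvSplit_eq]
  simp

theorem pvPartition_of_not_mem (sep : Char) (l : List Char) (h : sep ∉ l) :
    pvPartition sep l = (l, none) := by
  induction l with
  | nil => rfl
  | cons c cs ih =>
    simp only [List.mem_cons, not_or] at h
    have hcs : ¬ c = sep := fun hcc => h.1 hcc.symm
    simp [pvPartition, hcs, ih h.2]

theorem infix_iff_exists_prefix (sub t : List Char) : sub <:+: t ↔ ∃ j, sub <+: t.drop j := by
  constructor
  · intro h
    exact (PySem.Chars.exists_prefix_drop_iff_isIn sub t).mpr ((PySem.Chars.isIn_iff_infix sub t).mpr h)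
  · rintro ⟨j, hj⟩
    exact hj.isInfix.trans (List.drop_suffix j t).isInfix

theorem part2_none (c : Char) (l : List Char) (h : (pvPartition c l).2 = none) :
    l = (pvPartition c l).1 ∧ c ∉ (pvPartition c l).1 := by
  induction l with
  | nil => simp [pvPartition]
  | cons x xs ih =>
    by_cases hx : x = c
    · simp [pvPartition, hx] at h
    · simp only [pvPartition, if_neg hx] at h ⊢
      obtain ⟨h1, h2⟩ := ih h
      refine ⟨by rw [← h1], ?_⟩
      simp only [List.mem_cons, not_or]
      exact ⟨fun hc => hx hc.symm, h2⟩

theorem part2_some (c : Char) (l r : List Char) (h : (pvPartition c l).2 = some r) :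
    l = (pvPartition c l).1 ++ c :: r ∧ c ∉ (pvPartition c l).1 := by
  induction l generalizing r with
  | nil => simp [pvPartition] at h
  | cons x xs ih =>
    by_cases hx : x = c
    · simp only [pvPartition, if_pos hx] at h ⊢
      obtain rfl := Option.some_injective _ h
      simp [hx]
    · simp only [pvPartition, if_neg hx] at h ⊢
      obtain ⟨h1, h2⟩ := ih r h
      refine ⟨by rw [List.cons_append]; conv_lhs => rw [h1], ?_⟩
      simp only [List.mem_cons, not_or]
      exact ⟨fun hc => hx hc.symm, h2⟩

theorem clean_eq (name : List Char) :
    pvCleanA name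
      = String.ofList (pvTitle (PySem.Chars.replace (pvPartition '?' name).1 ['-'] [' '])) := by
  unfold pvCleanA
  by_cases h : PySem.Chars.isIn ['?'] name = true
  · rw [splitOn_eq_pvSplit, pvSplit_eq]
    simp [h]
  · have hmem : '?' ∉ name := by
      intro hm
      rcases List.mem_iff_append.mp hm with ⟨s, t, rfl⟩
      exact h ((PySem.Chars.isIn_iff_infix ['?'] _).mpr ⟨s, t, by simp⟩)
    rw [pvPartition_of_not_mem '?' name hmem]
    simp [h]

-- find characterisations
theorem single_prefix_iff (c : Char) (l : List Char) (j : Nat) :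
    [c] <+: l.drop j ↔ l[j]? = some c := by
  rw [← List.head?_drop]
  rcases l.drop j with _ | ⟨x, xs⟩
  · simp
  · constructor
    · intro h
      obtain ⟨rfl, -⟩ := List.cons_prefix_cons.mp h
      rfl
    · intro h
      obtain rfl : x = c := by simpa using h
      exact List.cons_prefix_cons.mpr ⟨rfl, List.nil_prefix⟩

theorem findFrom_eq_none_of (l sub : List Char) (k : Nat) (hk : k ≤ l.length)
    (h : ∀ i, k ≤ i → ¬ sub <+: l.drop i) :
    PySem.Chars.findFrom l sub (↑k : Int) = -1 := by
  rw [PySem.Chars.findFrom_natCast_eq_neg_one_iff l sub k hk]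
  intro hinf
  obtain ⟨j, hj⟩ := (infix_iff_exists_prefix sub (l.drop k)).mp hinf
  rw [List.drop_drop] at hj
  exact h (k + j) (by omega) hj

theorem findFrom_eq_of (l sub : List Char) (k m : Nat) (hk : k ≤ l.length) (hkm : k ≤ m)
    (hm : sub <+: l.drop m) (hmin : ∀ i, k ≤ i → i < m → ¬ sub <+: l.drop i) :
    PySem.Chars.findFrom l sub (↑k : Int) = (↑m : Int) := by
  have hne : PySem.Chars.findFrom l sub (↑k : Int) ≠ -1 := by
    intro hminus
    have hinf := (PySem.Chars.findFrom_natCast_eq_neg_one_iff l sub k hk).mp hminus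
    apply hinf
    rw [infix_iff_exists_prefix]
    refine ⟨m - k, ?_⟩
    rwa [List.drop_drop, Nat.add_sub_cancel' hkm]
  obtain ⟨h1, h2, h3⟩ := PySem.Chars.findFrom_natCast_spec l sub k hk hne
  set f := PySem.Chars.findFrom l sub (↑k : Int) with hfdef
  have hf0 : 0 ≤ f := le_trans (by omega) h1
  have hkf : k ≤ f.toNat := by omega
  rcases Nat.lt_trichotomy f.toNat m with hlt | heq | hgt
  · exact absurd h2 (hmin f.toNat hkf hlt)
  · omega
  · exact absurd hm (h3 m hkm hgt)

-- skip-loop invariant: pvSkip finds the least boundary occurrence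
theorem skip_char (l : List Char) (i : Nat) (hi : i < l.length) (ho : pvOcc l i)
    (hmin : ∀ j < i, ¬ pvBdy l j) :
    (pvSkip l i).elim (∀ j, ¬ pvBdy l j) (fun k => pvBdy l k ∧ ∀ j < k, ¬ pvBdy l j) := by
  revert hi ho hmin
  fun_induction pvSkip l i with
  | case1 i hcond =>
    intro hi ho hmin
    simp only [Option.elim_some]
    exact ⟨⟨ho, hcond⟩, hmin⟩
  | case2 i hcond h hf =>
    intro hi ho hmin
    simp only [Option.elim_none]
    intro j
    rcases Nat.lt_trichotomy j i with hj | rfl | hj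
    · exact hmin j hj
    · exact fun hb => hcond hb.2
    · rintro ⟨hocc, -⟩
      have hninf := (PySem.Chars.findFrom_natCast_eq_neg_one_iff l pvCatg (i + 1) h).mp hf
      apply hninf
      rw [infix_iff_exists_prefix]
      exact ⟨j - (i + 1), by rwa [List.drop_drop, Nat.add_sub_cancel' (by omega)]⟩
  | case3 i hcond h hf ih =>
    intro hi ho hmin
    obtain ⟨h1, h2, h3⟩ := PySem.Chars.findFrom_natCast_spec l pvCatg (i + 1) h hf
    apply ih
    · exact pvOccLt h2
    · exact h2
    · intro j hj
      rcases Nat.lt_trichotomy j i with hj' | rfl | hj'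
      · exact hmin j hj'
      · exact fun hb => hcond hb.2
      · rintro ⟨hocc, -⟩
        exact h3 j (by omega) (by omega) hocc
  | case4 i hcond h =>
    intro hi ho hmin
    omega

theorem bsearch_char (l : List Char) :
    (pvBSearch l).elim (∀ j, ¬ pvBdy l j) (fun k => pvBdy l k ∧ ∀ j < k, ¬ pvBdy l j) := by
  unfold pvBSearch
  by_cases hf : PySem.Chars.find l pvCatg = -1
  · rw [if_pos hf]
    simp only [Option.elim_none]
    intro j
    rintro ⟨hocc, -⟩
    have hninf : ¬ pvCatg <:+: l := by
      rw [← PySem.Chars.find_eq_neg_one_iff]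
      exact hf
    exact hninf (hocc.isInfix.trans (List.drop_suffix j l).isInfix)
  · rw [if_neg hf]
    have hpos : 0 ≤ PySem.Chars.find l pvCatg := by
      have := PySem.Chars.neg_one_le_find l pvCatg
      omega
    obtain ⟨hpre, hmin⟩ := PySem.Chars.find_spec hpos
    apply skip_char
    · exact pvOccLt hpre
    · exact hpre
    · intro j hj
      rintro ⟨hocc, -⟩
      exact hmin j hj hocc

theorem bsearch_none_of (l : List Char) (h : ∀ j, ¬ pvBdy l j) : pvBSearch l = none := by
  cases h' : pvBSearch l with
  | none => rfl
  | some k =>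
    have hc := bsearch_char l
    rw [h'] at hc
    simp only [Option.elim_some] at hc
    exact absurd hc.1 (h k)

theorem bsearch_some_of (l : List Char) (m : Nat) (hm : pvBdy l m) (hmin : ∀ j < m, ¬ pvBdy l j) :
    pvBSearch l = some m := by
  cases h' : pvBSearch l with
  | none =>
    have hc := bsearch_char l
    rw [h'] at hc
    simp only [Option.elim_none] at hc
    exact absurd hm (hc m)
  | some k =>
    have hc := bsearch_char l
    rw [h'] at hc
    simp only [Option.elim_some] at hc
    obtain ⟨hbk, hmink⟩ := hc
    congr 1
    rcases Nat.lt_trichotomy k m with h1 | h1 | h1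
    · exact absurd hbk (hmin k h1)
    · exact h1
    · exact absurd hm (hmink m h1)

-- structure of l = a ++ '/' :: r
theorem prefix_append_sep (pat a r : List Char) (hc : '/' ∉ pat)
    (h : pat <+: (a ++ '/' :: r)) : pat <+: a := by
  induction a generalizing pat with
  | nil =>
    cases pat with
    | nil => exact List.nil_prefix
    | cons y p =>
      obtain ⟨rfl, -⟩ := List.cons_prefix_cons.mp h
      exact absurd (List.mem_cons_self) hc
  | cons x a' ih =>
    cases pat with
    | nil => exact List.nil_prefix
    | cons y p =>
      rw [List.cons_append] at h
      obtain ⟨rfl, hp⟩ := List.cons_prefix_cons.mp h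
      have hcp : '/' ∉ p := fun hm => hc (List.mem_cons_of_mem _ hm)
      exact List.cons_prefix_cons.mpr ⟨rfl, ih p hcp hp⟩

theorem drop_shift (a r : List Char) (j : Nat) :
    (a ++ '/' :: r).drop (a.length + 1 + j) = r.drop j := by
  have h1 : a.length + 1 + j = a.length + (1 + j) := by omega
  rw [h1, List.drop_append]
  simp [Nat.add_comm 1 j]

theorem bdy_low (a r : List Char) (hs : '/' ∉ a) (hna : ¬ pvCatg <+: a) :
    ∀ j ≤ a.length, ¬ pvBdy (a ++ '/' :: r) j := by
  intro j hj
  rintro ⟨hocc, hbd⟩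
  rcases Nat.eq_zero_or_pos j with rfl | hj1
  · exact hna (prefix_append_sep pvCatg a r (by decide) hocc)
  · rcases hbd with rfl | hget
    · omega
    · have hja : j - 1 < a.length := by omega
      rw [List.getElem?_append_left hja, List.getElem?_eq_getElem hja] at hget
      have : a[j-1] = '/' := by simpa using hget
      exact hs (this ▸ List.getElem_mem hja)

theorem bdy_shift (a r : List Char) (j : Nat) :
    pvBdy (a ++ '/' :: r) (a.length + 1 + j) ↔ pvBdy r j := by
  unfold pvBdy pvOcc
  rw [drop_shift]
  have hb : (a.length + 1 + j = 0 ∨ (a ++ '/' :: r)[a.length + 1 + j - 1]? = some '/')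
      ↔ (j = 0 ∨ r[j - 1]? = some '/') := by
    cases j with
    | zero =>
      simp
    | succ j' =>
      have h1 : a.length + 1 + (j' + 1) - 1 = a.length + (j' + 1) := by omega
      rw [h1, List.getElem?_append_right (by omega)]
      have h2 : a.length + (j' + 1) - a.length = j' + 1 := by omega
      rw [h2]
      simp
  rw [hb]

theorem findFrom_shift (a r : List Char) (c : Char) (s : Nat) (hs : s ≤ r.length) :
    PySem.Chars.findFrom (a ++ '/' :: r) [c] (↑(a.length + 1 + s) : Int)
      = if PySem.Chars.findFrom r [c] (↑s : Int) = -1 then -1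
        else (↑(a.length + 1) : Int) + PySem.Chars.findFrom r [c] (↑s : Int) := by
  have hlen : a.length + 1 + s ≤ (a ++ '/' :: r).length := by simp; omega
  by_cases hfr : PySem.Chars.findFrom r [c] (↑s : Int) = -1
  · rw [if_pos hfr]
    have hninf := (PySem.Chars.findFrom_natCast_eq_neg_one_iff r [c] s hs).mp hfr
    apply findFrom_eq_none_of _ _ _ hlen
    intro i hi hp
    apply hninf
    rw [infix_iff_exists_prefix]
    refine ⟨i - (a.length + 1) - s, ?_⟩
    rw [List.drop_drop, show s + (i - (a.length + 1) - s) = i - (a.length + 1) by omega]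
    rw [show i = a.length + 1 + (i - (a.length + 1)) by omega] at hp
    rwa [drop_shift] at hp
  · rw [if_neg hfr]
    obtain ⟨h1, h2, h3⟩ := PySem.Chars.findFrom_natCast_spec r [c] s hs hfr
    set fr := PySem.Chars.findFrom r [c] (↑s : Int) with hfrdef
    have hfr0 : 0 ≤ fr := le_trans (by omega) h1
    have hgoal : (↑(a.length + 1) : Int) + fr = ↑(a.length + 1 + fr.toNat) := by push_cast; omega
    rw [hgoal]
    apply findFrom_eq_of _ _ _ _ hlen (by omega)
    · rw [drop_shift]
      exact h2
    · intro i hi1 hi2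
      have hdecomp : i = a.length + 1 + (i - (a.length + 1)) := by omega
      rw [hdecomp, drop_shift]
      exact h3 (i - (a.length + 1)) (by omega) (by omega)

-- first '/' of a ++ '/' :: r
theorem find_first_slash (a r : List Char) (hs : '/' ∉ a) :
    PySem.Chars.findFrom (a ++ '/' :: r) ['/'] ((0 : Nat) : Int) = (↑a.length : Int) := by
  apply findFrom_eq_of _ _ _ _ (by omega) (by omega)
  · rw [show (a ++ '/' :: r).drop a.length = '/' :: r by simp]
    exact List.cons_prefix_cons.mpr ⟨rfl, List.nil_prefix⟩
  · intro i hi1 hi2 hp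
    rw [single_prefix_iff, List.getElem?_append_left hi2, List.getElem?_eq_getElem hi2] at hp
    have : a[i] = '/' := by simpa using hp
    exact hs (this ▸ List.getElem_mem hi2)

-- the stopping index used by B's e1/e2 defaulting
def pvStop (t : List Char) (c : Char) : Nat :=
  (if PySem.Chars.find t [c] = -1 then (t.length : Int) else PySem.Chars.find t [c]).toNat

theorem pvStop_spec (t : List Char) (c : Char) :
    pvStop t c ≤ t.length ∧ (∀ i < pvStop t c, t[i]? ≠ some c) ∧
      (pvStop t c < t.length → t[pvStop t c]? = some c) := by
  unfold pvStop
  by_cases hf : PySem.Chars.find t [c] = -1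
  · rw [if_pos hf]
    have hninf := (PySem.Chars.find_eq_neg_one_iff t [c]).mp hf
    simp only [Int.toNat_natCast]
    refine ⟨le_refl _, ?_, by omega⟩
    intro i hi hget
    apply hninf
    rw [infix_iff_exists_prefix]
    exact ⟨i, (single_prefix_iff c t i).mpr hget⟩
  · rw [if_neg hf]
    have hpos : 0 ≤ PySem.Chars.find t [c] := by
      have := PySem.Chars.neg_one_le_find t [c]
      omega
    obtain ⟨hpre, hmin⟩ := PySem.Chars.find_spec hpos
    rw [single_prefix_iff] at hpre
    have hlt : (PySem.Chars.find t [c]).toNat < t.length := by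
      by_contra hge
      rw [List.getElem?_eq_none (by omega)] at hpre
      simp at hpre
    refine ⟨by omega, ?_, fun _ => hpre⟩
    intro i hi hget
    exact hmin i hi ((single_prefix_iff c t i).mpr hget)

theorem partition_fst_eq_take (c : Char) (t : List Char) :
    (pvPartition c t).1 = t.take (pvStop t c) := by
  cases hp : (pvPartition c t).2 with
  | none =>
    obtain ⟨h1, h2⟩ := part2_none c t hp
    have hnm : c ∉ t := by rw [h1]; exact h2
    have hf : PySem.Chars.find t [c] = -1 := by
      rw [PySem.Chars.find_eq_neg_one_iff]
      intro hinf
      obtain ⟨j, hj⟩ := (infix_iff_exists_prefix [c] t).mp hinf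
      rw [single_prefix_iff] at hj
      have hjlt : j < t.length := by
        by_contra hge
        rw [List.getElem?_eq_none (by omega)] at hj
        simp at hj
      rw [List.getElem?_eq_getElem hjlt] at hj
      have : t[j] = c := by simpa using hj
      exact hnm (this ▸ List.getElem_mem hjlt)
    unfold pvStop
    rw [if_pos hf]
    simp [← h1]
  | some s =>
    obtain ⟨h1, h2⟩ := part2_some c t s hp
    set b := (pvPartition c t).1 with hbdef
    have hf : PySem.Chars.find t [c] = (↑b.length : Int) := by
      have := PySem.Chars.findFrom_zero t [c]
      rw [show PySem.Chars.find t [c] = PySem.Chars.findFrom t [c] ((0 : Nat) : Int) by simp]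
      apply findFrom_eq_of _ _ _ _ (by omega) (by omega)
      · rw [h1, show (b ++ c :: s).drop b.length = c :: s by simp]
        exact List.cons_prefix_cons.mpr ⟨rfl, List.nil_prefix⟩
      · intro i _ hi2 hpp
        rw [single_prefix_iff, h1, List.getElem?_append_left hi2, List.getElem?_eq_getElem hi2] at hpp
        have : b[i] = c := by simpa using hpp
        exact h2 (this ▸ List.getElem_mem hi2)
    unfold pvStop
    rw [if_neg (by rw [hf]; omega), hf]
    simp only [Int.toNat_natCast]
    rw [h1]
    simp


theorem single_occ_lt {c : Char} {t : List Char} {m : Nat} (h : [c] <+: t.drop m) : m < t.length := by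
  rw [single_prefix_iff] at h
  by_contra hge
  rw [List.getElem?_eq_none (by omega)] at h
  simp at h

theorem slice_shift (a r : List Char) (x y : Int) (hx : 0 ≤ x) (hy : 0 ≤ y) :
    PySem.List.slice (a ++ '/' :: r) (some ((↑(a.length + 1) : Int) + x)) (some ((↑(a.length + 1) : Int) + y))
      = PySem.List.slice r (some x) (some y) := by
  rw [PySem.List.slice_toNat _ (by omega) (by omega), PySem.List.slice_toNat _ hx hy]
  have h1 : ((↑(a.length + 1) : Int) + x).toNat = a.length + 1 + x.toNat := by omega
  have h2 : ((↑(a.length + 1) : Int) + y).toNat = a.length + 1 + y.toNat := by omega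
  rw [h1, h2, drop_shift]
  congr 1
  omega

theorem pvTail_eq (l : List Char) (i : Nat) :
    pvTail l i =
      if PySem.Chars.findFrom l ['/'] (↑i : Int) = -1 then "General"
      else
        String.ofList (pvTitle (PySem.Chars.replace
          (PySem.List.slice l (some (PySem.Chars.findFrom l ['/'] (↑i : Int) + 1))
            (some (min
              (if PySem.Chars.findFrom l ['/'] (PySem.Chars.findFrom l ['/'] (↑i : Int) + 1) = -1
                then (l.length : Int)
                else PySem.Chars.findFrom l ['/'] (PySem.Chars.findFrom l ['/'] (↑i : Int) + 1))
              (if PySem.Chars.findFrom l ['?'] (PySem.Chars.findFrom l ['/'] (↑i : Int) + 1) = -1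
                then (l.length : Int)
                else PySem.Chars.findFrom l ['?'] (PySem.Chars.findFrom l ['/'] (↑i : Int) + 1)))))
          ['-'] [' ']))
    := rfl

theorem stop_unique (t : List Char) (c : Char) (n : Nat) (hn : n ≤ t.length)
    (hno : ∀ i < n, t[i]? ≠ some c) (hat : n < t.length → t[n]? = some c) :
    pvStop t c = n := by
  obtain ⟨h1, h2, h3⟩ := pvStop_spec t c
  rcases Nat.lt_trichotomy (pvStop t c) n with h | h | h
  · exact absurd (h3 (by omega)) (hno _ h)
  · exact h
  · exact absurd (hat (by omega)) (h2 _ h)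

theorem take_stop_comm (r : List Char) :
    (r.take (pvStop r '/')).take (pvStop (r.take (pvStop r '/')) '?')
      = r.take (min (pvStop r '/') (pvStop r '?')) := by
  obtain ⟨h11, h12, h13⟩ := pvStop_spec r '/'
  obtain ⟨h21, h22, h23⟩ := pvStop_spec r '?'
  have hblen : (r.take (pvStop r '/')).length = pvStop r '/' := by
    rw [List.length_take]; omega
  by_cases hlt : pvStop r '?' < pvStop r '/'
  · have hstop : pvStop (r.take (pvStop r '/')) '?' = pvStop r '?' := by
      apply stop_unique _ _ _ (by omega)
      · intro i hi
        rw [List.getElem?_take, if_pos (by omega)]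
        exact h22 i hi
      · intro _
        rw [List.getElem?_take, if_pos (by omega)]
        exact h23 (by omega)
    rw [hstop, List.take_take]
    congr 1
    omega
  · have hstop : pvStop (r.take (pvStop r '/')) '?' = pvStop r '/' := by
      apply stop_unique _ _ _ (by omega)
      · intro i hi
        rw [List.getElem?_take, if_pos (by omega)]
        exact h22 i (by omega)
      · intro h
        exact absurd h (by omega)
    rw [hstop, List.take_take]
    congr 1
    omega

theorem tail_shift (a r : List Char) (k : Nat) (hk : k < r.length) :
    pvTail (a ++ '/' :: r) (a.length + 1 + k) = pvTail r k := by
  rw [pvTail_eq, pvTail_eq]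
  rw [findFrom_shift a r '/' k (by omega)]
  by_cases hj : PySem.Chars.findFrom r ['/'] (↑k : Int) = -1
  · rw [if_pos (by rw [if_pos hj]), if_pos hj]
  · obtain ⟨hj1, hj2, -⟩ := PySem.Chars.findFrom_natCast_spec r ['/'] k (by omega) hj
    set jr := PySem.Chars.findFrom r ['/'] (↑k : Int) with hjrdef
    have hjr0 : 0 ≤ jr := le_trans (by omega) hj1
    have hjrlt : jr.toNat < r.length := single_occ_lt hj2
    rw [if_neg (by rw [if_neg hj]; omega), if_neg hj, if_neg hj]
    have hrwr : jr + 1 = (↑(jr.toNat + 1) : Int) := by omega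
    have hA : (↑(a.length + 1) : Int) + jr + 1 = (↑(a.length + 1 + (jr.toNat + 1)) : Int) := by
      push_cast; omega
    rw [hA, hrwr]
    rw [findFrom_shift a r '/' (jr.toNat + 1) (by omega), findFrom_shift a r '?' (jr.toNat + 1) (by omega)]
    set e1r := PySem.Chars.findFrom r ['/'] (↑(jr.toNat + 1) : Int) with he1def
    set e2r := PySem.Chars.findFrom r ['?'] (↑(jr.toNat + 1) : Int) with he2def
    have he1r : -1 ≤ e1r := by
      by_cases h : e1r = -1
      · omega
      · obtain ⟨hh, -, -⟩ := PySem.Chars.findFrom_natCast_spec r ['/'] (jr.toNat + 1) (by omega) (he1def ▸ h)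
        omega
    have he2r : -1 ≤ e2r := by
      by_cases h : e2r = -1
      · omega
      · obtain ⟨hh, -, -⟩ := PySem.Chars.findFrom_natCast_spec r ['?'] (jr.toNat + 1) (by omega) (he2def ▸ h)
        omega
    have hE1 : (if (if e1r = -1 then (-1 : Int) else ↑(a.length + 1) + e1r) = -1
        then ((a ++ '/' :: r).length : Int)
        else (if e1r = -1 then (-1 : Int) else ↑(a.length + 1) + e1r))
        = ↑(a.length + 1) + (if e1r = -1 then (r.length : Int) else e1r) := by
      by_cases h : e1r = -1
      · rw [if_pos h, if_pos rfl, if_pos h]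
        simp
        omega
      · rw [if_neg h, if_neg (by omega), if_neg h]
    have hE2 : (if (if e2r = -1 then (-1 : Int) else ↑(a.length + 1) + e2r) = -1
        then ((a ++ '/' :: r).length : Int)
        else (if e2r = -1 then (-1 : Int) else ↑(a.length + 1) + e2r))
        = ↑(a.length + 1) + (if e2r = -1 then (r.length : Int) else e2r) := by
      by_cases h : e2r = -1
      · rw [if_pos h, if_pos rfl, if_pos h]
        simp
        omega
      · rw [if_neg h, if_neg (by omega), if_neg h]
    rw [hE1, hE2]
    have hmin : min (↑(a.length + 1) + (if e1r = -1 then (r.length : Int) else e1r))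
        (↑(a.length + 1) + (if e2r = -1 then (r.length : Int) else e2r))
        = ↑(a.length + 1) + min (if e1r = -1 then (r.length : Int) else e1r)
            (if e2r = -1 then (r.length : Int) else e2r) := by
      omega
    rw [hmin]
    have hypos : (0 : Int) ≤ min (if e1r = -1 then (r.length : Int) else e1r)
        (if e2r = -1 then (r.length : Int) else e2r) := by
      by_cases h1 : e1r = -1 <;> by_cases h2 : e2r = -1 <;> simp [h1, h2] <;> omega
    have hB : (↑(a.length + 1 + (jr.toNat + 1)) : Int) = (↑(a.length + 1) : Int) + ↑(jr.toNat + 1) := by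
      push_cast; omega
    rw [hB, slice_shift a r _ _ (by omega) hypos]

theorem tail_zero (a r : List Char) (hs : '/' ∉ a) :
    pvTail (a ++ '/' :: r) 0
      = String.ofList (pvTitle (PySem.Chars.replace
          (pvPartition '?' ((pvPartition '/' r).1)).1 ['-'] [' '])) := by
  rw [pvTail_eq, find_first_slash a r hs]
  rw [if_neg (by omega)]
  have hrw : (↑a.length : Int) + 1 = (↑(a.length + 1 + 0) : Int) := by push_cast; omega
  rw [hrw, findFrom_shift a r '/' 0 (by omega), findFrom_shift a r '?' 0 (by omega)]
  have hz : ((0 : Nat) : Int) = (0 : Int) := rfl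
  rw [hz] at *
  have hf0 : ∀ c : Char, PySem.Chars.findFrom r [c] (0 : Int) = PySem.Chars.find r [c] := by
    intro c
    simp
  rw [hf0, hf0]
  have hE : ∀ c : Char, (if (if PySem.Chars.find r [c] = -1 then (-1 : Int) else ↑(a.length + 1) + PySem.Chars.find r [c]) = -1
      then ((a ++ '/' :: r).length : Int)
      else (if PySem.Chars.find r [c] = -1 then (-1 : Int) else ↑(a.length + 1) + PySem.Chars.find r [c]))
      = ↑(a.length + 1 + pvStop r c) := by
    intro c
    unfold pvStop
    by_cases h : PySem.Chars.find r [c] = -1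
    · rw [if_pos h, if_pos rfl]
      simp
      omega
    · have hge : 0 ≤ PySem.Chars.find r [c] := by
        have := PySem.Chars.neg_one_le_find r [c]
        omega
      rw [if_neg h, if_neg (by omega)]
      push_cast
      omega
  rw [hE '/', hE '?']
  have hmin : min (↑(a.length + 1 + pvStop r '/') : Int) (↑(a.length + 1 + pvStop r '?') : Int)
      = (↑(a.length + 1) : Int) + ↑(min (pvStop r '/') (pvStop r '?')) := by
    push_cast
    omega
  rw [hmin]
  rw [show (↑(a.length + 1 + 0) : Int) = (↑(a.length + 1) : Int) + (0 : Int) by push_cast; omega]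
  have hfix : (↑(a.length + 1) : Int) + 0 + (↑(min (pvStop r '/') (pvStop r '?')) : Int)
      = (↑(a.length + 1) : Int) + (↑(min (pvStop r '/') (pvStop r '?')) : Int) := by omega
  rw [hfix, slice_shift a r 0 _ (by omega) (by positivity)]
  rw [show PySem.List.slice r (some (0 : Int)) (some (↑(min (pvStop r '/') (pvStop r '?')) : Int))
      = r.take (min (pvStop r '/') (pvStop r '?')) by
    rw [show (0 : Int) = ((0 : Nat) : Int) from rfl, PySem.List.slice_natCast]
    simp]
  rw [partition_fst_eq_take '?', partition_fst_eq_take '/', take_stop_comm]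

theorem main_eq_aux : ∀ (n : Nat) (l : List Char), l.length ≤ n →
    pvAltBody l = pvLoopA (pvSplit '/' l) := by
  intro n
  induction n with
  | zero =>
    intro l hl
    have : l = [] := List.eq_nil_of_length_eq_zero (by omega)
    subst this
    rw [pvSplit_eq]
    decide
  | succ n ih =>
    intro l hl
    rw [pvSplit_eq]
    cases hp : (pvPartition '/' l).2 with
    | none =>
      obtain ⟨h1, h2⟩ := part2_none '/' l hp
      simp only [Option.elim_none]
      show pvAltBody l = pvLoopA [(pvPartition '/' l).1]
      rw [show pvLoopA [(pvPartition '/' l).1] = "General" from rfl]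
      unfold pvAltBody
      cases hb : pvBSearch l with
      | none => rfl
      | some i =>
        have hc := bsearch_char l
        rw [hb] at hc
        simp only [Option.elim_some] at hc
        obtain ⟨⟨hocc, -⟩, -⟩ := hc
        have hi : i < l.length := pvOccLt hocc
        show pvTail l i = "General"
        rw [pvTail_eq, if_pos ?_]
        apply findFrom_eq_none_of _ _ _ (by omega)
        intro m _ hpm
        rw [single_prefix_iff] at hpm
        have hmlt : m < l.length := by
          by_contra hge
          rw [List.getElem?_eq_none (by omega)] at hpm
          simp at hpm
        rw [List.getElem?_eq_getElem hmlt] at hpm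
        have hlm : l[m] = '/' := by simpa using hpm
        have hmem : '/' ∈ l := hlm ▸ List.getElem_mem hmlt
        rw [h1] at hmem
        exact h2 hmem
    | some r =>
      obtain ⟨h1, h2⟩ := part2_some '/' l r hp
      set a := (pvPartition '/' l).1 with hadef
      simp only [Option.elim_some]
      rw [pvSplit_eq '/' r]
      have hcatg : "CATG".toList = pvCatg := rfl
      by_cases hstart : PySem.Chars.startswith a "CATG".toList = true
      · simp only [pvLoopA, if_pos hstart]
        have hpre : pvCatg <+: a := by
          rw [← hcatg]
          exact (PySem.Chars.startswith_iff a "CATG".toList).mp hstart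
        have hb0 : pvBdy l 0 := by
          refine ⟨?_, Or.inl rfl⟩
          unfold pvOcc
          rw [List.drop_zero, h1]
          exact hpre.trans (a.prefix_append _)
        have hbs := bsearch_some_of l 0 hb0 (fun j hj => absurd hj (Nat.not_lt_zero j))
        unfold pvAltBody
        rw [hbs]
        show pvTail l 0 = pvCleanA (pvPartition '/' r).1
        rw [h1, tail_zero a r h2, clean_eq]
      · simp only [pvLoopA, if_neg hstart]
        rw [← pvSplit_eq '/' r]
        have hrlen : r.length ≤ n := by
          have := pvPartition_some_length '/' l r hp
          omega
        rw [← ih r hrlen]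
        have hna : ¬ pvCatg <+: a := by
          intro hp'
          apply hstart
          rw [PySem.Chars.startswith_iff, hcatg]
          exact hp'
        unfold pvAltBody
        cases hbr : pvBSearch r with
        | none =>
          have hcr := bsearch_char r
          rw [hbr] at hcr
          simp only [Option.elim_none] at hcr
          have hbl : pvBSearch l = none := by
            apply bsearch_none_of
            intro j
            rcases Nat.lt_or_ge j (a.length + 1) with hj | hj
            · rw [h1]
              exact bdy_low a r h2 hna j (by omega)
            · rw [h1, show j = a.length + 1 + (j - (a.length + 1)) by omega, bdy_shift]
              exact hcr _
          rw [hbl]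
        | some k =>
          have hcr := bsearch_char r
          rw [hbr] at hcr
          simp only [Option.elim_some] at hcr
          obtain ⟨hbk, hmink⟩ := hcr
          have hkl : k < r.length := pvOccLt hbk.1
          have hbl : pvBSearch l = some (a.length + 1 + k) := by
            apply bsearch_some_of
            · rw [h1]
              exact (bdy_shift a r k).mpr hbk
            · intro j hj
              rcases Nat.lt_or_ge j (a.length + 1) with hja | hja
              · rw [h1]
                exact bdy_low a r h2 hna j (by omega)
              · rw [h1, show j = a.length + 1 + (j - (a.length + 1)) by omega, bdy_shift]
                exact hmink _ (by omega)
          rw [hbl]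
          show pvTail l (a.length + 1 + k) = pvTail r k
          rw [h1, tail_shift a r k hkl]

theorem main_eq (l : List Char) : pvAltBody l = pvLoopA (pvSplit '/' l) :=
  main_eq_aux l.length l (le_refl _)

-- ===== VERDICT (by name: the statement is the Claim_ definition above) =====
theorem extract_category_from_url_py_spec : Claim_equal_extract_category_from_url_py := by
  intro url _
  unfold Spec_extract_category_from_url_py extract_category_from_url_py extract_category_from_url_py_alt
  by_cases h : url = ""
  · simp [h]
  · simp only [h, if_false]
    have hsep : "/".toList = ['/'] := rfl
    rw [hsep, splitOn_eq_pvSplit, main_eq]
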